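-- pv_equiv track=rewrite | github.com/daniel67-py/Valknut_Project | survivaltool.py | per_lines
-- ===== SOURCE A (Python) =====
-- def per_lines(sequence, symbol_to_modify, replace_open_parse, replace_ending_parse):
--     analyse = sequence.splitlines()
--     mark_code = 0
--     new_output = ""
--
--     for y in analyse:
--         if "<pre><code>" in y:
--             mark_code = 1
--         elif "</code></pre>" in y:
--             mark_code = 0
--
--         if y.startswith(symbol_to_modify) == True and mark_code == 0:
--             y = y.replace(symbol_to_modify, replace_open_parse)
--             y += replace_ending_parse
--             new_output += y
--         else:
--             new_output += y
--         new_output += "\n"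
--
--     return new_output
-- ===== SOURCE B (Python) =====
-- def per_lines(sequence, symbol_to_modify, replace_open_parse, replace_ending_parse):
--     lines = sequence.splitlines()
--     mask = []
--     flag = 0
--     for y in lines:
--         if "<pre><code>" in y:
--             flag = 1
--         elif "</code></pre>" in y:
--             flag = 0
--         mask.append(flag == 0)
--     return "".join(
--         (y.replace(symbol_to_modify, replace_open_parse) + replace_ending_parse
--          if active and y.startswith(symbol_to_modify) else y) + "\n"
--         for y, active in zip(lines, mask))
-- ===== Notes on version B (the rewrite author's own statement) =====
-- stated objective: alternative
-- what changed: Replaces A's single fold that threads both the code-block flag and the growing output string with a two-pass decomposition: first build a boolean mask per line (flag recorded after the toggle), then join the per-line transformations of zip(lines, mask).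
import Mathlib
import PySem

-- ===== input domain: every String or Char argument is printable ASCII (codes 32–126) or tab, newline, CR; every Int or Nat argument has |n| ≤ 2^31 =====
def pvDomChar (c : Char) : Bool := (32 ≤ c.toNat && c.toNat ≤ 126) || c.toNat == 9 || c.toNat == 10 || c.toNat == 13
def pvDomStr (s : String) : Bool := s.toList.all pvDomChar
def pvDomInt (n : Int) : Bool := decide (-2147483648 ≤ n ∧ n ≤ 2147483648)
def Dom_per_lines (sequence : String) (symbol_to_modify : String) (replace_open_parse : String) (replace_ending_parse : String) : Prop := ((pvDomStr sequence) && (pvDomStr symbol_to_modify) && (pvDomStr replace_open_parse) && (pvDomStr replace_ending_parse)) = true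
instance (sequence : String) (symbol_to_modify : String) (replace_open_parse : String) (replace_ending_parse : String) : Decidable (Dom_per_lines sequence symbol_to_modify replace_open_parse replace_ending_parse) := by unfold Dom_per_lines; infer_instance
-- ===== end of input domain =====

-- B replaces A's single fold threading (flag, output-string) with a two-pass decomposition
-- (boolean mask first, then join of per-line transforms); same cost — objective: alternative.

-- ===== PORT A =====
-- the if/elif toggle of the code-block flag, shared verbatim by both Pythons
def pvToggle (y : String) (f : Int) : Int :=
  if PySem.Str.isIn "<pre><code>" y then 1
  else if PySem.Str.isIn "</code></pre>" y then 0
  else f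

-- A's loop body: state = (mark_code, new_output)
def pvStepA (symbol_to_modify replace_open_parse replace_ending_parse : String)
    (st : Int × String) (y : String) : Int × String :=
  let mark_code := pvToggle y st.1
  let new_output :=
    if PySem.Str.startswith y symbol_to_modify && (mark_code == 0) then
      st.2 ++ (PySem.Str.replace y symbol_to_modify replace_open_parse ++ replace_ending_parse)
    else st.2 ++ y
  (mark_code, new_output ++ "\n")

def per_lines (sequence : String) (symbol_to_modify : String) (replace_open_parse : String) (replace_ending_parse : String) : String :=
  ((PySem.Str.splitlines sequence).foldl
    (pvStepA symbol_to_modify replace_open_parse replace_ending_parse)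
    ((0 : Int), "")).2

-- ===== PORT B =====
-- B's first pass: state = (flag, mask); mask records flag==0 after the toggle
def pvStepM (st : Int × List Bool) (y : String) : Int × List Bool :=
  let flag := pvToggle y st.1
  (flag, st.2 ++ [flag == 0])

-- B's per-line transform for the second pass over zip(lines, mask)
def pvEmit (symbol_to_modify replace_open_parse replace_ending_parse : String)
    (p : String × Bool) : String :=
  (if p.2 && PySem.Str.startswith p.1 symbol_to_modify then
      PySem.Str.replace p.1 symbol_to_modify replace_open_parse ++ replace_ending_parse
    else p.1) ++ "\n"

def per_lines_alt (sequence : String) (symbol_to_modify : String) (replace_open_parse : String) (replace_ending_parse : String) : String :=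
  let lines := PySem.Str.splitlines sequence
  let mask := (lines.foldl pvStepM ((0 : Int), [])).2
  PySem.Str.join "" ((lines.zip mask).map
    (pvEmit symbol_to_modify replace_open_parse replace_ending_parse))

-- ===== PRECONDITION & SPEC =====
def Spec_per_lines (sequence : String) (symbol_to_modify : String) (replace_open_parse : String) (replace_ending_parse : String) (out : String) : Prop := out = per_lines_alt sequence symbol_to_modify replace_open_parse replace_ending_parse
instance (sequence : String) (symbol_to_modify : String) (replace_open_parse : String) (replace_ending_parse : String) (out : String) : Decidable (Spec_per_lines sequence symbol_to_modify replace_open_parse replace_ending_parse out) := by unfold Spec_per_lines; infer_instance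

-- ===== CLAIM (what is proved, stated in full; the proofs are below) =====
def Claim_equal_per_lines : Prop := ∀ (sequence : String) (symbol_to_modify : String) (replace_open_parse : String) (replace_ending_parse : String), Dom_per_lines sequence symbol_to_modify replace_open_parse replace_ending_parse → Spec_per_lines sequence symbol_to_modify replace_open_parse replace_ending_parse (per_lines sequence symbol_to_modify replace_open_parse replace_ending_parse)

-- ===== LEMMAS AND PROOFS =====

-- reference recursion: what both programs append for the tail `t` starting with flag `f`
def pvBody (symbol_to_modify replace_open_parse replace_ending_parse : String) : List String → Int → String
  | [], _ => ""
  | y :: t, f =>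
    ((if PySem.Str.startswith y symbol_to_modify && (pvToggle y f == 0) then
        PySem.Str.replace y symbol_to_modify replace_open_parse ++ replace_ending_parse
      else y) ++ "\n")
    ++ pvBody symbol_to_modify replace_open_parse replace_ending_parse t (pvToggle y f)

-- reference recursion for B's mask
def pvMaskRec : List String → Int → List Bool
  | [], _ => []
  | y :: t, f => (pvToggle y f == 0) :: pvMaskRec t (pvToggle y f)

theorem pvFoldA_eq (sym ro re : String) :
    ∀ (t : List String) (f : Int) (acc : String),
      (t.foldl (pvStepA sym ro re) (f, acc)).2
        = acc ++ pvBody sym ro re t f := by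
  intro t
  induction t with
  | nil => intro f acc; simp [pvBody]
  | cons y t ih =>
      intro f acc
      simp only [List.foldl_cons, pvStepA, pvBody, ih]
      split <;> simp [String.append_assoc]

theorem pvFoldM_eq :
    ∀ (t : List String) (f : Int) (acc : List Bool),
      (t.foldl pvStepM (f, acc)).2 = acc ++ pvMaskRec t f := by
  intro t
  induction t with
  | nil => intro f acc; simp [pvMaskRec]
  | cons y t ih =>
      intro f acc
      simp [List.foldl_cons, pvStepM, pvMaskRec, ih]

theorem pvJoinCharsCons (x : List Char) (xs : List (List Char)) :
    PySem.Chars.join [] (x :: xs) = x ++ PySem.Chars.join [] xs := by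
  cases xs <;> simp [PySem.Chars.join, List.intercalate, List.intersperse]

theorem pvJoinCons (x : String) (xs : List String) :
    PySem.Str.join "" (x :: xs) = x ++ PySem.Str.join "" xs := by
  rw [← String.toList_inj]
  simp [PySem.Str.toList_join, pvJoinCharsCons]

theorem pvJoinNil : PySem.Str.join "" ([] : List String) = "" := by
  rw [← String.toList_inj]
  simp [PySem.Str.toList_join, PySem.Chars.join, List.intercalate]

theorem pvJoinZip_eq (sym ro re : String) :
    ∀ (t : List String) (f : Int),
      PySem.Str.join "" ((t.zip (pvMaskRec t f)).map (pvEmit sym ro re))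
        = pvBody sym ro re t f := by
  intro t
  induction t with
  | nil => intro f; simp [pvMaskRec, pvJoinNil, pvBody]
  | cons y t ih =>
      intro f
      simp only [pvMaskRec, List.zip_cons_cons, List.map_cons, pvJoinCons, ih, pvBody, pvEmit,
        Bool.and_comm]

-- ===== VERDICT (by name: the statement is the Claim_ definition above) =====
theorem per_lines_spec : Claim_equal_per_lines := by
  intro sequence sym ro re _
  unfold Spec_per_lines per_lines per_lines_alt
  simp [pvFoldA_eq, pvFoldM_eq, pvJoinZip_eq]
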